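-- pv_equiv track=rewrite | github.com/coderJakub/EverybodyCodes | 2024 - The Kingdom of Algorithmia/Day19/B.py | calc
-- ===== SOURCE A (Python) =====
-- def calc(key,grid):
--     for s in range(100):
--         index = 0
--         for i in range(1,len(grid)-1):
--             for j in range(1,len(grid[0])-1):
--                 rotationPoint = (i,j)
--                 #rotate all 8 neighbors of rotationPoint clockwise (R) (0,1 gets 0,2, ...) or counterclockwise (L)
--                 match key[index]:
--                     case 'R':
--                         neighbors_l = [[i+x,j+y] for x,y in [[-1,-1],[-1,0],[-1,1],[0,1],[1,1],[1,0],[1,-1],[0,-1]]]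
--                         buf = grid[neighbors_l[7][0]][neighbors_l[7][1]]
--                         for k in range(7,0,-1):
--                             grid[neighbors_l[k][0]][neighbors_l[k][1]] = grid[neighbors_l[k-1][0]][neighbors_l[k-1][1]]
--                         grid[neighbors_l[0][0]][neighbors_l[0][1]] = buf
--
--                     case 'L':
--                         neighbors_l = [[i+x,j+y] for x,y in [[-1,-1],[0,-1],[1,-1],[1,0],[1,1],[0,1],[-1,1],[-1,0]]]
--                         buf = grid[neighbors_l[7][0]][neighbors_l[7][1]]
--                         for k in range(7,0,-1):
--                             grid[neighbors_l[k][0]][neighbors_l[k][1]] = grid[neighbors_l[k-1][0]][neighbors_l[k-1][1]]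
--                         grid[neighbors_l[0][0]][neighbors_l[0][1]] = buf
--                 index = (index+1)%len(key)
--     return grid
-- ===== SOURCE B (Python) =====
-- def calc(key, grid):
--     # 100 rounds of the same cell-permutation: compute the one-round source map once,
--     # raise it to the 100th power by repeated squaring, then gather from the input grid.
--     # (Does not mutate grid, unlike the original; return values agree.)
--     R = len(grid)
--     C = len(grid[0]) if grid else 0
--     # one round applied to cell coordinates: after a round, cell (i,j) holds the
--     # value that stood at lab[i][j] before the round
--     lab = [[(i, j) for j in range(len(grid[i]))] for i in range(R)]
--     idx = 0
--     for i in range(1, R - 1):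
--         for j in range(1, C - 1):
--             c = key[idx]
--             if c == 'R':
--                 ring = [(i-1, j-1), (i-1, j), (i-1, j+1), (i, j+1),
--                         (i+1, j+1), (i+1, j), (i+1, j-1), (i, j-1)]
--             elif c == 'L':
--                 ring = [(i-1, j-1), (i, j-1), (i+1, j-1), (i+1, j),
--                         (i+1, j+1), (i, j+1), (i-1, j+1), (i-1, j)]
--             else:
--                 ring = None
--             if ring is not None:
--                 vals = [lab[x][y] for (x, y) in ring]
--                 for t in range(8):
--                     x, y = ring[t]
--                     lab[x][y] = vals[t - 1]
--             idx = (idx + 1) % len(key)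
--
--     def comp(a, b):
--         return [[a[x][y] for (x, y) in row] for row in b]
--
--     acc = [[(i, j) for j in range(len(grid[i]))] for i in range(R)]
--     base = lab
--     e = 100
--     while e:
--         if e % 2 == 1:
--             acc = comp(acc, base)
--         base = comp(base, base)
--         e //= 2
--     return [[grid[x][y] for (x, y) in row] for row in acc]
-- ===== Notes on version B (the rewrite author's own statement) =====
-- stated objective: faster
-- what changed: Instead of simulating all 100 rounds of neighbor rotations on the string grid, B computes the one-round cell-source permutation once by running a single round on a grid of coordinates, raises it to the 100th power by repeated squaring of permutation composition, and gathers the answer from the input grid in one pass.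
import Mathlib
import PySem

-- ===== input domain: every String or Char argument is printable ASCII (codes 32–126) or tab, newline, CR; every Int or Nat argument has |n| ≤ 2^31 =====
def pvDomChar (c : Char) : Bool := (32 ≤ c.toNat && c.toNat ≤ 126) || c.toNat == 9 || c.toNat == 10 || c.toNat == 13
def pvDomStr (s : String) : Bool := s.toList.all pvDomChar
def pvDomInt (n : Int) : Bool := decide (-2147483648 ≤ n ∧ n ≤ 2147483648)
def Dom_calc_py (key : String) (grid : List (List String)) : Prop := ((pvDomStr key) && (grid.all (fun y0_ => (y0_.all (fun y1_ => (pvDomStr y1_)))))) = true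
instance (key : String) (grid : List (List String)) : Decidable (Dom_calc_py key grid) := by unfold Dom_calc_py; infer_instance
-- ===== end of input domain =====

-- B computes the one-round cell-source permutation once and raises it to the 100th power by
-- repeated squaring instead of re-simulating the rotations 100 times (measured faster, constant factor).
-- A mutates its grid argument in place, B does not: the equivalence proved is about the RETURN value.

-- ===== PORT A =====

-- grid[p] / grid[p] = v on nested lists (indices here are always ≥ 0 in both programs)
def cGet {α : Type} (d : α) (g : List (List α)) (p : Nat × Nat) : α :=
  (g.getD p.1 []).getD p.2 d

def cSet {α : Type} (g : List (List α)) (p : Nat × Nat) (v : α) : List (List α) :=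
  g.set p.1 ((g.getD p.1 []).set p.2 v)

-- [[i+x, j+y] for x, y in [...]] for key 'R' resp. 'L' (i, j ≥ 1 wherever these are used)
def ringR (i j : Nat) : List (Nat × Nat) :=
  [(i-1, j-1), (i-1, j), (i-1, j+1), (i, j+1), (i+1, j+1), (i+1, j), (i+1, j-1), (i, j-1)]

def ringL (i j : Nat) : List (Nat × Nat) :=
  [(i-1, j-1), (i, j-1), (i+1, j-1), (i+1, j), (i+1, j+1), (i, j+1), (i-1, j+1), (i-1, j)]

-- buf = grid[nb[7]]; for k in range(7,0,-1): grid[nb[k]] = grid[nb[k-1]]; grid[nb[0]] = buf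
def shiftA (g : List (List String)) (nb : List (Nat × Nat)) : List (List String) :=
  let buf := cGet "" g (nb.getD 7 (0, 0))
  let g1 := [7, 6, 5, 4, 3, 2, 1].foldl
    (fun h k => cSet h (nb.getD k (0, 0)) (cGet "" h (nb.getD (k-1) (0, 0)))) g
  cSet g1 (nb.getD 0 (0, 0)) buf

-- the body of the j-loop: match key[index] …; index = (index+1) % len(key)
def stepA (key : String) (st : List (List String) × Int) (i j : Nat) :
    List (List String) × Int :=
  let c? := PySem.Str.pyGet? key st.2
  let g' := if c? = some 'R' then shiftA st.1 (ringR i j)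
            else if c? = some 'L' then shiftA st.1 (ringL i j)
            else st.1
  (g', PySem.Int.mod (st.2 + 1) (PySem.Str.len key))

-- one iteration of the s-loop: index = 0; for i in range(1, len(grid)-1): for j in range(1, len(grid[0])-1): …
def roundA (key : String) (g0 : List (List String)) : List (List String) :=
  ((PySem.List.pyRange 1 ((g0.length : Int) - 1) 1).foldl
    (fun st i =>
      (PySem.List.pyRange 1 (((st.1.getD 0 []).length : Int) - 1) 1).foldl
        (fun st' j => stepA key st' i.toNat j.toNat) st)
    (g0, 0)).1

def calc_py (key : String) (grid : List (List String)) : List (List String) :=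
  (List.range 100).foldl (fun g _ => roundA key g) grid

-- ===== PORT B =====

-- [[(i, j) for j in range(len(grid[i]))] for i in range(R)]
def labGrid (g : List (List String)) : List (List (Nat × Nat)) :=
  (List.range g.length).map (fun i => (List.range ((g.getD i []).length)).map (fun j => (i, j)))

-- vals = [lab[x][y] for (x,y) in ring]; for t in range(8): lab[ring[t]] = vals[t-1]
def rotB (l : List (List (Nat × Nat))) (ring : List (Nat × Nat)) : List (List (Nat × Nat)) :=
  let vals := ring.map (cGet (0, 0) l)
  (List.range 8).foldl
    (fun h t => cSet h (ring.getD t (0, 0)) ((PySem.List.pyGet? vals ((t : Int) - 1)).getD (0, 0))) l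

-- body of B's j-loop on the coordinate grid
def stepB (key : String) (st : List (List (Nat × Nat)) × Int) (i j : Nat) :
    List (List (Nat × Nat)) × Int :=
  let c? := PySem.Str.pyGet? key st.2
  let l' := if c? = some 'R' then rotB st.1 (ringR i j)
            else if c? = some 'L' then rotB st.1 (ringL i j)
            else st.1
  (l', PySem.Int.mod (st.2 + 1) (PySem.Str.len key))

-- B's single simulated round (on coordinates; R and C are read once)
def oneRound (key : String) (R C : Nat) (l : List (List (Nat × Nat))) :
    List (List (Nat × Nat)) :=
  ((PySem.List.pyRange 1 ((R : Int) - 1) 1).foldl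
    (fun st i =>
      (PySem.List.pyRange 1 ((C : Int) - 1) 1).foldl
        (fun st' j => stepB key st' i.toNat j.toNat) st)
    (l, 0)).1

-- comp(a, b) = [[a[x][y] for (x,y) in row] for row in b]
def comp (a b : List (List (Nat × Nat))) : List (List (Nat × Nat)) :=
  b.map (List.map (fun p => cGet (0, 0) a p))

-- while e: if e % 2 == 1: acc = comp(acc, base); base = comp(base, base); e //= 2
def powLoop (acc base : List (List (Nat × Nat))) (e : Nat) : List (List (Nat × Nat)) :=
  if h : e = 0 then acc
  else powLoop (if e % 2 = 1 then comp acc base else acc) (comp base base) (e / 2)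
  termination_by e
  decreasing_by exact Nat.div_lt_self (Nat.pos_of_ne_zero h) (by omega)

def calc_py_alt (key : String) (grid : List (List String)) : List (List String) :=
  let R := grid.length
  let C := (grid.getD 0 []).length
  let lab := oneRound key R C (labGrid grid)
  let acc := powLoop (labGrid grid) lab 100
  acc.map (List.map (fun p => cGet "" grid p))

-- ===== PRECONDITION & SPEC =====

-- For grids with interior cells (≥ 3 rows and ≥ 3 columns) Pre_ requires the key to be
-- non-empty (A raises IndexError on key[0] otherwise) and the grid to be rectangular:
-- on a ragged grid whether A returns or raises depends on which key letters trigger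
-- rotations, not on a closed shape condition, so the equivalence is claimed (and proved)
-- on rectangular grids; degenerate grids (≤ 2 rows or ≤ 2 columns), which A returns
-- unchanged, are admitted with any row shape and any key.
def Pre_calc_py (key : String) (grid : List (List String)) : Prop :=
  (grid.length ≤ 2 ∨ (grid.getD 0 []).length ≤ 2) ∨
  (key ≠ "" ∧ ∀ row ∈ grid, row.length = (grid.getD 0 []).length)

instance (key : String) (grid : List (List String)) : Decidable (Pre_calc_py key grid) := by
  unfold Pre_calc_py; infer_instance

def pvWitness_calc_py : String × List (List String) :=
  ("RL", [["a", "b", "c"], ["d", "e", "f"], ["g", "h", "i"]])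

def Spec_calc_py (key : String) (grid : List (List String)) (out : List (List String)) : Prop :=
  out = calc_py_alt key grid

instance (key : String) (grid : List (List String)) (out : List (List String)) :
    Decidable (Spec_calc_py key grid out) := by unfold Spec_calc_py; infer_instance

-- ===== CLAIM (what is proved, stated in full; the proofs are below) =====

def Claim_equal_calc_py : Prop :=
  ∀ (key : String) (grid : List (List String)),
    Dom_calc_py key grid → Pre_calc_py key grid → Spec_calc_py key grid (calc_py key grid)

-- ===== LEMMAS AND PROOFS =====

def mapG {α β : Type} (f : α → β) (l : List (List α)) : List (List β) :=
  l.map (List.map f)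

def applySets {α : Type} (l : List (List α)) (xs : List ((Nat × Nat) × α)) : List (List α) :=
  xs.foldl (fun h pv => cSet h pv.1 pv.2) l

def Shaped {α : Type} (R C : Nat) (l : List (List α)) : Prop :=
  l.length = R ∧ ∀ a, a < R → (l.getD a []).length = C

def posGrid (R C : Nat) : List (List (Nat × Nat)) :=
  (List.range R).map (fun i => (List.range C).map (fun j => (i, j)))

def InB (R C : Nat) (p : Nat × Nat) : Prop := p.1 < R ∧ p.2 < C

lemma inb_mk {R C a b : Nat} (h1 : a < R) (h2 : b < C) : InB R C (a, b) := ⟨h1, h2⟩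

def ValidG (R C : Nat) (l : List (List (Nat × Nat))) : Prop :=
  Shaped R C l ∧ ∀ a b : Nat, a < R → b < C → InB R C (cGet (0, 0) l (a, b))

lemma getD_mapG {α β : Type} (f : α → β) (l : List (List α)) (a : Nat) :
    (mapG f l).getD a [] = (l.getD a []).map f := by
  by_cases h : a < l.length
  · rw [List.getD_eq_getElem _ _ (by simpa [mapG] using h), List.getD_eq_getElem _ _ h]
    simp [mapG]
  · rw [List.getD_eq_getElem?_getD, List.getD_eq_getElem?_getD,
      List.getElem?_eq_none (by simpa [mapG] using Nat.le_of_not_lt h),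
      List.getElem?_eq_none (Nat.le_of_not_lt h)]
    rfl

lemma cGet_mapG {α β : Type} (d : α) (d' : β) (f : α → β) (l : List (List α)) (p : Nat × Nat)
    (h2 : p.2 < (l.getD p.1 []).length) :
    cGet d' (mapG f l) p = f (cGet d l p) := by
  unfold cGet
  rw [getD_mapG, List.getD_eq_getElem _ _ (by simpa using h2),
    List.getD_eq_getElem _ _ h2, List.getElem_map]

lemma cSet_mapG {α β : Type} (f : α → β) (l : List (List α)) (p : Nat × Nat) (v : α) :
    cSet (mapG f l) p (f v) = mapG f (cSet l p v) := by
  unfold cSet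
  rw [getD_mapG]
  show (mapG f l).set p.1 _ = _
  unfold mapG
  rw [← List.map_set, ← List.map_set]

lemma cGet_cSet_ne {α : Type} (d : α) (l : List (List α)) (p q : Nat × Nat) (v : α)
    (h : q ≠ p) : cGet d (cSet l p v) q = cGet d l q := by
  obtain ⟨p1, p2⟩ := p
  obtain ⟨q1, q2⟩ := q
  unfold cGet cSet
  dsimp only
  simp only [List.getD_eq_getElem?_getD]
  by_cases h1 : q1 = p1
  · subst h1
    have h2 : q2 ≠ p2 := by simpa [Prod.ext_iff] using h
    by_cases hr : q1 < l.length
    · rw [List.getElem?_set_self hr]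
      simp only [Option.getD_some]
      rw [List.getElem?_set_ne (Ne.symm h2)]
    · simp only [List.set_eq_of_length_le (Nat.le_of_not_lt hr)]
  · rw [List.getElem?_set_ne (fun hh => h1 hh.symm)]

lemma cGet_cSet_self {α : Type} (d : α) (l : List (List α)) (p : Nat × Nat) (v : α)
    (h1 : p.1 < l.length) (h2 : p.2 < (l.getD p.1 []).length) :
    cGet d (cSet l p v) p = v := by
  obtain ⟨p1, p2⟩ := p
  unfold cGet cSet
  dsimp only at h1 h2 ⊢
  simp only [List.getD_eq_getElem?_getD] at h2 ⊢
  rw [List.getElem?_set_self h1]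
  simp only [Option.getD_some]
  rw [List.getElem?_set_self (by simpa using h2)]
  rfl

lemma cSet_comm {α : Type} (l : List (List α)) (p q : Nat × Nat) (v w : α) (h : p ≠ q) :
    cSet (cSet l p v) q w = cSet (cSet l q w) p v := by
  obtain ⟨p1, p2⟩ := p
  obtain ⟨q1, q2⟩ := q
  unfold cSet
  dsimp only
  simp only [List.getD_eq_getElem?_getD]
  by_cases h1 : p1 = q1
  · subst h1
    have h2 : p2 ≠ q2 := by simpa [Prod.ext_iff] using h
    by_cases hr : p1 < l.length
    · rw [List.getElem?_set_self hr, List.getElem?_set_self hr]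
      simp only [Option.getD_some, List.set_set]
      rw [List.set_comm _ _ h2]
    · simp only [List.set_eq_of_length_le (Nat.le_of_not_lt hr)]
  · rw [List.getElem?_set_ne h1, List.getElem?_set_ne (fun hh => h1 hh.symm),
      List.set_comm _ _ h1]

lemma shaped_cSet {α : Type} {R C : Nat} {l : List (List α)} (hs : Shaped R C l)
    (p : Nat × Nat) (v : α) : Shaped R C (cSet l p v) := by
  obtain ⟨p1, p2⟩ := p
  refine ⟨by simpa [cSet] using hs.1, fun a ha => ?_⟩
  have hrow := hs.2 a ha
  unfold cSet
  dsimp only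
  simp only [List.getD_eq_getElem?_getD] at hrow ⊢
  by_cases h1 : a = p1
  · subst h1
    by_cases hr : a < l.length
    · rw [List.getElem?_set_self hr]
      simpa using hrow
    · simp only [List.set_eq_of_length_le (Nat.le_of_not_lt hr)]
      exact hrow
  · rw [List.getElem?_set_ne (fun hh => h1 hh.symm)]
    exact hrow

lemma validG_cSet {R C : Nat} {l : List (List (Nat × Nat))} (hv : ValidG R C l)
    (p : Nat × Nat) (v : Nat × Nat) (hb : InB R C v) : ValidG R C (cSet l p v) := by
  refine ⟨shaped_cSet hv.1 p v, fun a b ha hb' => ?_⟩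
  by_cases hpq : (a, b) = p
  · subst hpq
    rw [cGet_cSet_self _ _ _ _ (by rw [hv.1.1]; exact ha) (by rw [hv.1.2 a ha]; exact hb')]
    exact hb
  · rw [cGet_cSet_ne _ _ _ _ _ hpq]
    exact hv.2 a b ha hb'

lemma applySets_validG {R C : Nat} (xs : List ((Nat × Nat) × (Nat × Nat)))
    {l : List (List (Nat × Nat))} (hv : ValidG R C l)
    (hxs : ∀ pv ∈ xs, InB R C pv.2) : ValidG R C (applySets l xs) := by
  induction xs generalizing l with
  | nil => exact hv
  | cons x t ih =>
      exact ih (validG_cSet hv x.1 x.2 (hxs x (by simp))) (fun pv hpv => hxs pv (by simp [hpv]))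

lemma applySets_mapG {α β : Type} (f : α → β) (xs : List ((Nat × Nat) × α))
    (l : List (List α)) :
    mapG f (applySets l xs) = applySets (mapG f l) (xs.map (fun pv => (pv.1, f pv.2))) := by
  induction xs generalizing l with
  | nil => rfl
  | cons x t ih =>
      show mapG f (applySets (cSet l x.1 x.2) t) = applySets (cSet (mapG f l) x.1 (f x.2)) _
      rw [cSet_mapG, ih]

lemma applySets_perm {α : Type} {xs ys : List ((Nat × Nat) × α)} (hp : xs.Perm ys)
    (hd : xs.Pairwise (fun x y => x.1 ≠ y.1)) (l : List (List α)) :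
    applySets l xs = applySets l ys := by
  induction hp generalizing l with
  | nil => rfl
  | cons x _ ih =>
      exact ih (List.pairwise_cons.mp hd).2 (cSet l x.1 x.2)
  | swap x y _ =>
      show applySets (cSet (cSet l y.1 y.2) x.1 x.2) _ =
        applySets (cSet (cSet l x.1 x.2) y.1 y.2) _
      rw [cSet_comm _ _ _ _ _ ((List.pairwise_cons.mp hd).1 x (by simp)).symm]
  | trans h1 _ ih1 ih2 =>
      exact (ih1 hd l).trans
        (ih2 ((List.Perm.pairwise_iff
          (R := fun (x y : (Nat × Nat) × α) => x.1 ≠ y.1)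
          (fun h => Ne.symm h) h1).mp hd) l)

lemma foldl_inv {σ γ : Type} (P : σ → Prop) (f : σ → γ → σ) (is : List γ) (s : σ)
    (h0 : P s) (hstep : ∀ s' x, x ∈ is → P s' → P (f s' x)) : P (is.foldl f s) := by
  induction is generalizing s with
  | nil => exact h0
  | cons a t ih =>
      exact ih (f s a) (hstep s a (by simp) h0)
        (fun s' x hx h => hstep s' x (by simp [hx]) h)

lemma foldl_rel {σ τ γ : Type} (Rel : σ → τ → Prop) (f : σ → γ → σ) (g : τ → γ → τ)
    (is : List γ) (s : σ) (t : τ) (h0 : Rel s t)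
    (hstep : ∀ s' t' x, x ∈ is → Rel s' t' → Rel (f s' x) (g t' x)) :
    Rel (is.foldl f s) (is.foldl g t) := by
  induction is generalizing s t with
  | nil => exact h0
  | cons a u ih =>
      exact ih (f s a) (g t a) (hstep s t a (by simp) h0)
        (fun s' t' x hx h => hstep s' t' x (by simp [hx]) h)

lemma shiftA_explicit (g : List (List String)) (p0 p1 p2 p3 p4 p5 p6 p7 : Nat × Nat) :
    shiftA g [p0, p1, p2, p3, p4, p5, p6, p7] =
      cSet (cSet (cSet (cSet (cSet (cSet (cSet (cSet g p7 (cGet "" g p6)) p6 (cGet "" (cSet g p7 (cGet "" g p6)) p5)) p5 (cGet "" (cSet (cSet g p7 (cGet "" g p6)) p6 (cGet "" (cSet g p7 (cGet "" g p6)) p5)) p4)) p4 (cGet "" (cSet (cSet (cSet g p7 (cGet "" g p6)) p6 (cGet "" (cSet g p7 (cGet "" g p6)) p5)) p5 (cGet "" (cSet (cSet g p7 (cGet "" g p6)) p6 (cGet "" (cSet g p7 (cGet "" g p6)) p5)) p4)) p3)) p3 (cGet "" (cSet (cSet (cSet (cSet g p7 (cGet "" g p6)) p6 (cGet "" (cSet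 g p7 (cGet "" g p6)) p5)) p5 (cGet "" (cSet (cSet g p7 (cGet "" g p6)) p6 (cGet "" (cSet g p7 (cGet "" g p6)) p5)) p4)) p4 (cGet "" (cSet (cSet (cSet g p7 (cGet "" g p6)) p6 (cGet "" (cSet g p7 (cGet "" g p6)) p5)) p5 (cGet "" (cSet (cSet g p7 (cGet "" g p6)) p6 (cGet "" (cSet g p7 (cGet "" g p6)) p5)) p4)) p3)) p2)) p2 (cGet "" (cSet (cSet (cSet (cSet (cSet g p7 (cGet "" g p6)) p6 (cGet "" (cSet g p7 (cGet "" g p6)) p5)) p5 (cGet "" (cSet (cSet g p7 (cGet "" g p6)) p6 (cGet "" (cSet g p7 (cGet "" g p6)) p5)) p4)) p4 (cGet "" (cSet (cSet (cSet g p7 (cGet "" g p6)) p6 (cGet "" (cSet g p7 (cGet "" g p6)) p5)) p5 (cGet "" (cSet (cSet g p7 (cGet "" g p6)) p6 (cGet "" (cSet g p7 (cGet "" g p6)) p5)) p4)) p3)) p3 (cGet "" (cSet (cSet (cSet (cSet g p7 (cGet "" g p6)) p6 (cGet "" (cSet g p7 (cGet "" g p6)) p5)) p5 (cGet "" (cSet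 (cSet g p7 (cGet "" g p6)) p6 (cGet "" (cSet g p7 (cGet "" g p6)) p5)) p4)) p4 (cGet "" (cSet (cSet (cSet g p7 (cGet "" g p6)) p6 (cGet "" (cSet g p7 (cGet "" g p6)) p5)) p5 (cGet "" (cSet (cSet g p7 (cGet "" g p6)) p6 (cGet "" (cSet g p7 (cGet "" g p6)) p5)) p4)) p3)) p2)) p1)) p1 (cGet "" (cSet (cSet (cSet (cSet (cSet (cSet g p7 (cGet "" g p6)) p6 (cGet "" (cSet g p7 (cGet "" g p6)) p5)) p5 (cGet "" (cSet (cSet g p7 (cGet "" g p6)) p6 (cGet "" (cSet g p7 (cGet "" g p6)) p5)) p4)) p4 (cGet "" (cSet (cSet (cSet g p7 (cGet "" g p6)) p6 (cGet "" (cSet g p7 (cGet "" g p6)) p5)) p5 (cGet "" (cSet (cSet g p7 (cGet "" g p6)) p6 (cGet "" (cSet g p7 (cGet "" g p6)) p5)) p4)) p3)) p3 (cGet "" (cSet (cSet (cSet (cSet g p7 (cGet "" g p6)) p6 (cGet "" (cSet g p7 (cGet "" g p6)) p5)) p5 (cGet "" (cSet (cSet g p7 (cGet "" g p6)) p6 (cGet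 "" (cSet g p7 (cGet "" g p6)) p5)) p4)) p4 (cGet "" (cSet (cSet (cSet g p7 (cGet "" g p6)) p6 (cGet "" (cSet g p7 (cGet "" g p6)) p5)) p5 (cGet "" (cSet (cSet g p7 (cGet "" g p6)) p6 (cGet "" (cSet g p7 (cGet "" g p6)) p5)) p4)) p3)) p2)) p2 (cGet "" (cSet (cSet (cSet (cSet (cSet g p7 (cGet "" g p6)) p6 (cGet "" (cSet g p7 (cGet "" g p6)) p5)) p5 (cGet "" (cSet (cSet g p7 (cGet "" g p6)) p6 (cGet "" (cSet g p7 (cGet "" g p6)) p5)) p4)) p4 (cGet "" (cSet (cSet (cSet g p7 (cGet "" g p6)) p6 (cGet "" (cSet g p7 (cGet "" g p6)) p5)) p5 (cGet "" (cSet (cSet g p7 (cGet "" g p6)) p6 (cGet "" (cSet g p7 (cGet "" g p6)) p5)) p4)) p3)) p3 (cGet "" (cSet (cSet (cSet (cSet g p7 (cGet "" g p6)) p6 (cGet "" (cSet g p7 (cGet "" g p6)) p5)) p5 (cGet "" (cSet (cSet g p7 (cGet "" g p6)) p6 (cGet "" (cSet g p7 (cGet "" g p6)) p5)) p4)) p4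 (cGet "" (cSet (cSet (cSet g p7 (cGet "" g p6)) p6 (cGet "" (cSet g p7 (cGet "" g p6)) p5)) p5 (cGet "" (cSet (cSet g p7 (cGet "" g p6)) p6 (cGet "" (cSet g p7 (cGet "" g p6)) p5)) p4)) p3)) p2)) p1)) p0)) p0 (cGet "" g p7) := rfl


lemma rotB_applySets (l : List (List (Nat × Nat))) (p0 p1 p2 p3 p4 p5 p6 p7 : Nat × Nat) :
    rotB l [p0, p1, p2, p3, p4, p5, p6, p7] =
      applySets l [(p0, cGet (0,0) l p7), (p1, cGet (0,0) l p0), (p2, cGet (0,0) l p1), (p3, cGet (0,0) l p2), (p4, cGet (0,0) l p3), (p5, cGet (0,0) l p4), (p6, cGet (0,0) l p5), (p7, cGet (0,0) l p6)] := rfl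


lemma shiftA_applySets (g : List (List String)) (p0 p1 p2 p3 p4 p5 p6 p7 : Nat × Nat)
    (e02 : p0 ≠ p2) (e03 : p0 ≠ p3) (e04 : p0 ≠ p4) (e05 : p0 ≠ p5) (e06 : p0 ≠ p6) (e07 : p0 ≠ p7) (e13 : p1 ≠ p3) (e14 : p1 ≠ p4) (e15 : p1 ≠ p5) (e16 : p1 ≠ p6) (e17 : p1 ≠ p7) (e24 : p2 ≠ p4) (e25 : p2 ≠ p5) (e26 : p2 ≠ p6) (e27 : p2 ≠ p7) (e35 : p3 ≠ p5) (e36 : p3 ≠ p6) (e37 : p3 ≠ p7) (e46 : p4 ≠ p6) (e47 : p4 ≠ p7) (e57 : p5 ≠ p7) :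
    shiftA g [p0, p1, p2, p3, p4, p5, p6, p7] =
      applySets g [(p7, cGet "" g p6), (p6, cGet "" g p5), (p5, cGet "" g p4), (p4, cGet "" g p3), (p3, cGet "" g p2), (p2, cGet "" g p1), (p1, cGet "" g p0), (p0, cGet "" g p7)] := by
  rw [shiftA_explicit]
  rw [cGet_cSet_ne "" _ p7 p5 _ e57]
  rw [cGet_cSet_ne "" _ p6 p4 _ e46]
  rw [cGet_cSet_ne "" _ p7 p4 _ e47]
  rw [cGet_cSet_ne "" _ p5 p3 _ e35]
  rw [cGet_cSet_ne "" _ p6 p3 _ e36]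
  rw [cGet_cSet_ne "" _ p7 p3 _ e37]
  rw [cGet_cSet_ne "" _ p4 p2 _ e24]
  rw [cGet_cSet_ne "" _ p5 p2 _ e25]
  rw [cGet_cSet_ne "" _ p6 p2 _ e26]
  rw [cGet_cSet_ne "" _ p7 p2 _ e27]
  rw [cGet_cSet_ne "" _ p3 p1 _ e13]
  rw [cGet_cSet_ne "" _ p4 p1 _ e14]
  rw [cGet_cSet_ne "" _ p5 p1 _ e15]
  rw [cGet_cSet_ne "" _ p6 p1 _ e16]
  rw [cGet_cSet_ne "" _ p7 p1 _ e17]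
  rw [cGet_cSet_ne "" _ p2 p0 _ e02]
  rw [cGet_cSet_ne "" _ p3 p0 _ e03]
  rw [cGet_cSet_ne "" _ p4 p0 _ e04]
  rw [cGet_cSet_ne "" _ p5 p0 _ e05]
  rw [cGet_cSet_ne "" _ p6 p0 _ e06]
  rw [cGet_cSet_ne "" _ p7 p0 _ e07]
  rfl


lemma pairwise_ne8 {α : Type} (q0 q1 q2 q3 q4 q5 q6 q7 : Nat × Nat) (v0 v1 v2 v3 v4 v5 v6 v7 : α)
    (w01 : q0 ≠ q1) (w02 : q0 ≠ q2) (w03 : q0 ≠ q3) (w04 : q0 ≠ q4) (w05 : q0 ≠ q5) (w06 : q0 ≠ q6) (w07 : q0 ≠ q7) (w12 : q1 ≠ q2) (w13 : q1 ≠ q3) (w14 : q1 ≠ q4) (w15 : q1 ≠ q5) (w16 : q1 ≠ q6) (w17 : q1 ≠ q7) (w23 : q2 ≠ q3) (w24 : q2 ≠ q4) (w25 : q2 ≠ q5) (w26 : q2 ≠ q6) (w27 : q2 ≠ q7) (w34 : q3 ≠ q4) (w35 : q3 ≠ q5) (w36 : q3 ≠ q6) (w37 : q3 ≠ q7) (w45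 : q4 ≠ q5) (w46 : q4 ≠ q6) (w47 : q4 ≠ q7) (w56 : q5 ≠ q6) (w57 : q5 ≠ q7) (w67 : q6 ≠ q7) :
    ([(q0, v0), (q1, v1), (q2, v2), (q3, v3), (q4, v4), (q5, v5), (q6, v6), (q7, v7)] : List ((Nat × Nat) × α)).Pairwise (fun x y => x.1 ≠ y.1) := by
  refine List.Pairwise.cons (fun b hb => ?_) (List.Pairwise.cons (fun b hb => ?_)
    (List.Pairwise.cons (fun b hb => ?_) (List.Pairwise.cons (fun b hb => ?_)
    (List.Pairwise.cons (fun b hb => ?_) (List.Pairwise.cons (fun b hb => ?_)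
    (List.Pairwise.cons (fun b hb => ?_) (List.Pairwise.cons (fun b hb => ?_)
    List.Pairwise.nil)))))))
  all_goals simp only [List.mem_cons, List.not_mem_nil, or_false] at hb
  · rcases hb with rfl | rfl | rfl | rfl | rfl | rfl | rfl <;> assumption
  · rcases hb with rfl | rfl | rfl | rfl | rfl | rfl <;> assumption
  · rcases hb with rfl | rfl | rfl | rfl | rfl <;> assumption
  · rcases hb with rfl | rfl | rfl | rfl <;> assumption
  · rcases hb with rfl | rfl | rfl <;> assumption
  · rcases hb with rfl | rfl <;> assumption
  · rcases hb with rfl; assumption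


lemma rot_sim {R C : Nat} (g0 : List (List String)) (lab : List (List (Nat × Nat)))
    (hs : Shaped R C lab) (p0 p1 p2 p3 p4 p5 p6 p7 : Nat × Nat)
    (h0 : InB R C p0) (h1 : InB R C p1) (h2 : InB R C p2) (h3 : InB R C p3) (h4 : InB R C p4) (h5 : InB R C p5) (h6 : InB R C p6) (h7 : InB R C p7)
    (d01 : p0 ≠ p1) (d02 : p0 ≠ p2) (d03 : p0 ≠ p3) (d04 : p0 ≠ p4) (d05 : p0 ≠ p5) (d06 : p0 ≠ p6) (d07 : p0 ≠ p7) (d12 : p1 ≠ p2) (d13 : p1 ≠ p3) (d14 : p1 ≠ p4) (d15 : p1 ≠ p5) (d16 : p1 ≠ p6) (d17 : p1 ≠ p7) (d23 : p2 ≠ p3) (d24 : p2 ≠ p4) (d25 : p2 ≠ p5) (d26 : p2 ≠ p6) (d27 : p2 ≠ p7) (d34 : p3 ≠ p4) (d35 : p3 ≠ p5) (d36 : p3 ≠ p6) (d37 : p3 ≠ p7) (d45 : p4 ≠ p5) (d46 : p4 ≠ p6) (d47 : p4 ≠ p7) (d56 : p5 ≠ p6) (d57 : p5 ≠ p7) (d67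 : p6 ≠ p7) :
    shiftA (mapG (fun p => cGet "" g0 p) lab) [p0, p1, p2, p3, p4, p5, p6, p7]
      = mapG (fun p => cGet "" g0 p) (rotB lab [p0, p1, p2, p3, p4, p5, p6, p7]) := by
  have hread : ∀ p : Nat × Nat, InB R C p →
      cGet "" (mapG (fun p => cGet "" g0 p) lab) p = cGet "" g0 (cGet (0,0) lab p) := by
    intro p hp
    exact cGet_mapG (0,0) "" _ lab p (by rw [hs.2 p.1 (hs.1 ▸ hp.1)]; exact hp.2)
  rw [rotB_applySets, applySets_mapG]
  simp only [List.map_cons, List.map_nil]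
  rw [shiftA_applySets _ _ _ _ _ _ _ _ _ d02 d03 d04 d05 d06 d07 d13 d14 d15 d16 d17 d24 d25 d26 d27 d35 d36 d37 d46 d47 d57]
  rw [hread p0 h0, hread p1 h1, hread p2 h2, hread p3 h3, hread p4 h4, hread p5 h5, hread p6 h6, hread p7 h7]
  refine applySets_perm ?_ ?_ _
  · exact (List.reverse_perm _).symm
  · exact pairwise_ne8 p7 p6 p5 p4 p3 p2 p1 p0 _ _ _ _ _ _ _ _ (d67).symm (d57).symm (d47).symm (d37).symm (d27).symm (d17).symm (d07).symm (d56).symm (d46).symm (d36).symm (d26).symm (d16).symm (d06).symm (d45).symm (d35).symm (d25).symm (d15).symm (d05).symm (d34).symm (d24).symm (d14).symm (d04).symm (d23).symm (d13).symm (d03).symm (d12).symm (d02).symm (d01).symm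


lemma rot_nat {R C : Nat} (F : Nat × Nat → Nat × Nat) (lab : List (List (Nat × Nat)))
    (hs : Shaped R C lab) (p0 p1 p2 p3 p4 p5 p6 p7 : Nat × Nat)
    (h0 : InB R C p0) (h1 : InB R C p1) (h2 : InB R C p2) (h3 : InB R C p3) (h4 : InB R C p4) (h5 : InB R C p5) (h6 : InB R C p6) (h7 : InB R C p7) :
    rotB (mapG F lab) [p0, p1, p2, p3, p4, p5, p6, p7] = mapG F (rotB lab [p0, p1, p2, p3, p4, p5, p6, p7]) := by
  have hread : ∀ p : Nat × Nat, InB R C p →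
      cGet (0,0) (mapG F lab) p = F (cGet (0,0) lab p) := by
    intro p hp
    exact cGet_mapG (0,0) (0,0) F lab p (by rw [hs.2 p.1 (hs.1 ▸ hp.1)]; exact hp.2)
  rw [rotB_applySets, rotB_applySets, applySets_mapG]
  simp only [List.map_cons, List.map_nil]
  rw [hread p0 h0, hread p1 h1, hread p2 h2, hread p3 h3, hread p4 h4, hread p5 h5, hread p6 h6, hread p7 h7]


-- ring instantiations: bounds and disequalities are linear arithmetic on i, j
lemma rot_sim_R {R C : Nat} (g0 : List (List String)) (lab : List (List (Nat × Nat)))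
    (hs : Shaped R C lab) (i j : Nat)
    (hi : 1 ≤ i) (hi2 : i + 1 < R) (hj : 1 ≤ j) (hj2 : j + 1 < C) :
    shiftA (mapG (fun p => cGet "" g0 p) lab) (ringR i j)
      = mapG (fun p => cGet "" g0 p) (rotB lab (ringR i j)) := by
  unfold ringR
  refine rot_sim g0 lab hs (i-1, j-1) (i-1, j) (i-1, j+1) (i, j+1) (i+1, j+1) (i+1, j)
    (i+1, j-1) (i, j-1)
    (inb_mk (by omega) (by omega)) (inb_mk (by omega) (by omega))
    (inb_mk (by omega) (by omega)) (inb_mk (by omega) (by omega))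
    (inb_mk (by omega) (by omega)) (inb_mk (by omega) (by omega))
    (inb_mk (by omega) (by omega)) (inb_mk (by omega) (by omega))
    ?_ ?_ ?_ ?_ ?_ ?_ ?_ ?_ ?_ ?_ ?_ ?_ ?_ ?_ ?_ ?_ ?_ ?_ ?_ ?_ ?_ ?_ ?_ ?_ ?_ ?_ ?_ ?_
  all_goals intro h
  all_goals rw [Prod.mk.injEq] at h
  all_goals omega

lemma rot_sim_L {R C : Nat} (g0 : List (List String)) (lab : List (List (Nat × Nat)))
    (hs : Shaped R C lab) (i j : Nat)
    (hi : 1 ≤ i) (hi2 : i + 1 < R) (hj : 1 ≤ j) (hj2 : j + 1 < C) :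
    shiftA (mapG (fun p => cGet "" g0 p) lab) (ringL i j)
      = mapG (fun p => cGet "" g0 p) (rotB lab (ringL i j)) := by
  unfold ringL
  refine rot_sim g0 lab hs (i-1, j-1) (i, j-1) (i+1, j-1) (i+1, j) (i+1, j+1) (i, j+1)
    (i-1, j+1) (i-1, j)
    (inb_mk (by omega) (by omega)) (inb_mk (by omega) (by omega))
    (inb_mk (by omega) (by omega)) (inb_mk (by omega) (by omega))
    (inb_mk (by omega) (by omega)) (inb_mk (by omega) (by omega))
    (inb_mk (by omega) (by omega)) (inb_mk (by omega) (by omega))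
    ?_ ?_ ?_ ?_ ?_ ?_ ?_ ?_ ?_ ?_ ?_ ?_ ?_ ?_ ?_ ?_ ?_ ?_ ?_ ?_ ?_ ?_ ?_ ?_ ?_ ?_ ?_ ?_
  all_goals intro h
  all_goals rw [Prod.mk.injEq] at h
  all_goals omega

lemma rot_nat_R {R C : Nat} (F : Nat × Nat → Nat × Nat) (lab : List (List (Nat × Nat)))
    (hs : Shaped R C lab) (i j : Nat)
    (hi : 1 ≤ i) (hi2 : i + 1 < R) (hj : 1 ≤ j) (hj2 : j + 1 < C) :
    rotB (mapG F lab) (ringR i j) = mapG F (rotB lab (ringR i j)) := by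
  unfold ringR
  exact rot_nat F lab hs (i-1, j-1) (i-1, j) (i-1, j+1) (i, j+1) (i+1, j+1) (i+1, j)
    (i+1, j-1) (i, j-1)
    (inb_mk (by omega) (by omega)) (inb_mk (by omega) (by omega))
    (inb_mk (by omega) (by omega)) (inb_mk (by omega) (by omega))
    (inb_mk (by omega) (by omega)) (inb_mk (by omega) (by omega))
    (inb_mk (by omega) (by omega)) (inb_mk (by omega) (by omega))

lemma rot_nat_L {R C : Nat} (F : Nat × Nat → Nat × Nat) (lab : List (List (Nat × Nat)))
    (hs : Shaped R C lab) (i j : Nat)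
    (hi : 1 ≤ i) (hi2 : i + 1 < R) (hj : 1 ≤ j) (hj2 : j + 1 < C) :
    rotB (mapG F lab) (ringL i j) = mapG F (rotB lab (ringL i j)) := by
  unfold ringL
  exact rot_nat F lab hs (i-1, j-1) (i, j-1) (i+1, j-1) (i+1, j) (i+1, j+1) (i, j+1)
    (i-1, j+1) (i-1, j)
    (inb_mk (by omega) (by omega)) (inb_mk (by omega) (by omega))
    (inb_mk (by omega) (by omega)) (inb_mk (by omega) (by omega))
    (inb_mk (by omega) (by omega)) (inb_mk (by omega) (by omega))
    (inb_mk (by omega) (by omega)) (inb_mk (by omega) (by omega))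

lemma rotB_validG_R {R C : Nat} {l : List (List (Nat × Nat))} (hv : ValidG R C l)
    (i j : Nat) (hi : 1 ≤ i) (hi2 : i + 1 < R) (hj : 1 ≤ j) (hj2 : j + 1 < C) :
    ValidG R C (rotB l (ringR i j)) := by
  unfold ringR
  rw [rotB_applySets]
  refine applySets_validG _ hv ?_
  intro pv hpv
  simp only [List.mem_cons, List.not_mem_nil, or_false] at hpv
  rcases hpv with rfl | rfl | rfl | rfl | rfl | rfl | rfl | rfl <;>
    exact hv.2 _ _ (by omega) (by omega)

lemma rotB_validG_L {R C : Nat} {l : List (List (Nat × Nat))} (hv : ValidG R C l)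
    (i j : Nat) (hi : 1 ≤ i) (hi2 : i + 1 < R) (hj : 1 ≤ j) (hj2 : j + 1 < C) :
    ValidG R C (rotB l (ringL i j)) := by
  unfold ringL
  rw [rotB_applySets]
  refine applySets_validG _ hv ?_
  intro pv hpv
  simp only [List.mem_cons, List.not_mem_nil, or_false] at hpv
  rcases hpv with rfl | rfl | rfl | rfl | rfl | rfl | rfl | rfl <;>
    exact hv.2 _ _ (by omega) (by omega)

lemma stepB_validG {R C : Nat} (key : String) (st : List (List (Nat × Nat)) × Int)
    (hv : ValidG R C st.1) (i j : Nat)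
    (hi : 1 ≤ i) (hi2 : i + 1 < R) (hj : 1 ≤ j) (hj2 : j + 1 < C) :
    ValidG R C (stepB key st i j).1 := by
  simp only [stepB]
  by_cases hR' : PySem.Str.pyGet? key st.2 = some 'R'
  · rw [if_pos hR']
    exact rotB_validG_R hv i j hi hi2 hj hj2
  · rw [if_neg hR']
    by_cases hL' : PySem.Str.pyGet? key st.2 = some 'L'
    · rw [if_pos hL']
      exact rotB_validG_L hv i j hi hi2 hj hj2
    · rw [if_neg hL']
      exact hv

lemma step_sim {R C : Nat} (key : String) (g0 : List (List String))
    (t1 : List (List (Nat × Nat))) (idx : Int) (hv : ValidG R C t1) (i j : Nat)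
    (hi : 1 ≤ i) (hi2 : i + 1 < R) (hj : 1 ≤ j) (hj2 : j + 1 < C) :
    stepA key (mapG (fun p => cGet "" g0 p) t1, idx) i j
      = (mapG (fun p => cGet "" g0 p) (stepB key (t1, idx) i j).1,
         (stepB key (t1, idx) i j).2) := by
  simp only [stepA, stepB]
  by_cases hR' : PySem.Str.pyGet? key idx = some 'R'
  · rw [if_pos hR', if_pos hR']
    rw [rot_sim_R g0 t1 hv.1 i j hi hi2 hj hj2]
  · rw [if_neg hR', if_neg hR']
    by_cases hL' : PySem.Str.pyGet? key idx = some 'L'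
    · rw [if_pos hL', if_pos hL']
      rw [rot_sim_L g0 t1 hv.1 i j hi hi2 hj hj2]
    · rw [if_neg hL', if_neg hL']

lemma round_sim {R C : Nat} (key : String) (g0 : List (List String))
    (lab : List (List (Nat × Nat))) (hv : ValidG R C lab) :
    roundA key (mapG (fun p => cGet "" g0 p) lab)
      = mapG (fun p => cGet "" g0 p) (oneRound key R C lab) := by
  unfold roundA oneRound
  rw [show ((mapG (fun p => cGet "" g0 p) lab).length : Int) = (R : Int) by
    simp [mapG, hv.1.1]]
  have main := foldl_rel
    (fun (s : List (List String) × Int) (t : List (List (Nat × Nat)) × Int) =>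
      s.1 = mapG (fun p => cGet "" g0 p) t.1 ∧ s.2 = t.2 ∧ ValidG R C t.1)
    (fun st i =>
      (PySem.List.pyRange 1 (((st.1.getD 0 []).length : Int) - 1) 1).foldl
        (fun st' j => stepA key st' i.toNat j.toNat) st)
    (fun st i =>
      (PySem.List.pyRange 1 ((C : Int) - 1) 1).foldl
        (fun st' j => stepB key st' i.toNat j.toNat) st)
    (PySem.List.pyRange 1 ((R : Int) - 1) 1)
    (mapG (fun p => cGet "" g0 p) lab, 0) (lab, 0) ⟨rfl, rfl, hv⟩ ?_
  · exact main.1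
  · intro s t i hi hRel
    obtain ⟨hst, hidx, hvt⟩ := hRel
    rw [PySem.List.mem_pyRange_one] at hi
    try dsimp only
    have hrow : ((s.1.getD 0 []).length : Int) = (C : Int) := by
      rw [hst, getD_mapG, List.length_map, hvt.1.2 0 (by omega)]
    rw [hrow]
    refine foldl_rel
      (fun (s : List (List String) × Int) (t : List (List (Nat × Nat)) × Int) =>
        s.1 = mapG (fun p => cGet "" g0 p) t.1 ∧ s.2 = t.2 ∧ ValidG R C t.1)
      _ _ _ _ _ ⟨hst, hidx, hvt⟩ ?_
    intro s' t' j hj hRel'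
    obtain ⟨hst', hidx', hvt'⟩ := hRel'
    rw [PySem.List.mem_pyRange_one] at hj
    try dsimp only
    have h1 : 1 ≤ i.toNat := by omega
    have h2 : i.toNat + 1 < R := by omega
    have h3 : 1 ≤ j.toNat := by omega
    have h4 : j.toNat + 1 < C := by omega
    have hs' : s' = (mapG (fun p => cGet "" g0 p) t'.1, t'.2) := Prod.ext hst' hidx'
    rw [hs']
    rw [step_sim key g0 t'.1 t'.2 hvt' i.toNat j.toNat h1 h2 h3 h4]
    exact ⟨rfl, rfl, stepB_validG key (t'.1, t'.2) hvt' i.toNat j.toNat h1 h2 h3 h4⟩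

lemma round_nat {R C : Nat} (key : String) (F : Nat × Nat → Nat × Nat)
    (lab : List (List (Nat × Nat))) (hv : ValidG R C lab) :
    oneRound key R C (mapG F lab) = mapG F (oneRound key R C lab) := by
  unfold oneRound
  have main := foldl_rel
    (fun (s : List (List (Nat × Nat)) × Int) (t : List (List (Nat × Nat)) × Int) =>
      s.1 = mapG F t.1 ∧ s.2 = t.2 ∧ ValidG R C t.1)
    (fun st i =>
      (PySem.List.pyRange 1 ((C : Int) - 1) 1).foldl
        (fun st' j => stepB key st' i.toNat j.toNat) st)
    (fun st i =>
      (PySem.List.pyRange 1 ((C : Int) - 1) 1).foldl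
        (fun st' j => stepB key st' i.toNat j.toNat) st)
    (PySem.List.pyRange 1 ((R : Int) - 1) 1)
    (mapG F lab, 0) (lab, 0) ⟨rfl, rfl, hv⟩ ?_
  · exact main.1
  · intro s t i hi hRel
    obtain ⟨hst, hidx, hvt⟩ := hRel
    rw [PySem.List.mem_pyRange_one] at hi
    try dsimp only
    refine foldl_rel
      (fun (s : List (List (Nat × Nat)) × Int) (t : List (List (Nat × Nat)) × Int) =>
        s.1 = mapG F t.1 ∧ s.2 = t.2 ∧ ValidG R C t.1)
      _ _ _ _ _ ⟨hst, hidx, hvt⟩ ?_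
    intro s' t' j hj hRel'
    obtain ⟨hst', hidx', hvt'⟩ := hRel'
    rw [PySem.List.mem_pyRange_one] at hj
    try dsimp only
    have h1 : 1 ≤ i.toNat := by omega
    have h2 : i.toNat + 1 < R := by omega
    have h3 : 1 ≤ j.toNat := by omega
    have h4 : j.toNat + 1 < C := by omega
    have hs' : s' = (mapG F t'.1, t'.2) := Prod.ext hst' hidx'
    rw [hs']
    refine ⟨?_, rfl, stepB_validG key (t'.1, t'.2) hvt' i.toNat j.toNat h1 h2 h3 h4⟩
    show (stepB key (mapG F t'.1, t'.2) i.toNat j.toNat).1 = _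
    simp only [stepB]
    by_cases hR' : PySem.Str.pyGet? key t'.2 = some 'R'
    · rw [if_pos hR', if_pos hR']
      exact rot_nat_R F t'.1 hvt'.1 i.toNat j.toNat h1 h2 h3 h4
    · rw [if_neg hR', if_neg hR']
      by_cases hL' : PySem.Str.pyGet? key t'.2 = some 'L'
      · rw [if_pos hL', if_pos hL']
        exact rot_nat_L F t'.1 hvt'.1 i.toNat j.toNat h1 h2 h3 h4
      · rw [if_neg hL', if_neg hL']

lemma oneRound_validG {R C : Nat} (key : String) (l : List (List (Nat × Nat)))
    (hv : ValidG R C l) : ValidG R C (oneRound key R C l) := by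
  unfold oneRound
  refine foldl_inv (fun (st : List (List (Nat × Nat)) × Int) => ValidG R C st.1)
    _ _ _ hv ?_
  intro st i hi hP
  rw [PySem.List.mem_pyRange_one] at hi
  try dsimp only
  refine foldl_inv (fun (st : List (List (Nat × Nat)) × Int) => ValidG R C st.1)
    _ _ _ hP ?_
  intro st' j hj hP'
  rw [PySem.List.mem_pyRange_one] at hj
  exact stepB_validG key st' hP' i.toNat j.toNat (by omega) (by omega) (by omega) (by omega)

-- the coordinate grid is shaped, valid, and acts as the identity relabelling
lemma posGrid_validG (R C : Nat) : ValidG R C (posGrid R C) := by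
  have hlen : (posGrid R C).length = R := by simp [posGrid]
  have hrow : ∀ a, a < R → (posGrid R C).getD a [] = (List.range C).map (fun j => (a, j)) := by
    intro a ha
    rw [List.getD_eq_getElem _ _ (by simpa [posGrid] using ha)]
    simp [posGrid]
  refine ⟨⟨hlen, fun a ha => ?_⟩, fun a b ha hb => ?_⟩
  · rw [hrow a ha]
    simp
  · unfold cGet
    rw [hrow a ha]
    try dsimp only
    rw [List.getD_eq_getElem _ _ (by simpa using hb)]
    simp only [List.getElem_map, List.getElem_range]
    exact ⟨ha, hb⟩

lemma mapG_posGrid {α : Type} (d : α) (g : List (List α)) {R C : Nat}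
    (hs : Shaped R C g) : mapG (fun p => cGet d g p) (posGrid R C) = g := by
  apply List.ext_getElem
  · simp [mapG, posGrid, hs.1]
  · intro i h1 h2
    have hiR : i < R := by simpa [mapG, posGrid] using h1
    have hrow : (g.getD i []).length = C := hs.2 i hiR
    have hgi : g.getD i [] = g[i] := List.getD_eq_getElem _ _ h2
    have hlen : g[i].length = C := by rw [← hgi]; exact hrow
    apply List.ext_getElem
    · simp [mapG, posGrid, hlen]
    · intro j hj1 hj2
      simp only [mapG, posGrid, List.getElem_map, List.getElem_range]
      unfold cGet
      dsimp only
      rw [hgi]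
      exact List.getD_eq_getElem _ _ hj2

lemma mapG_mapG {α β γ : Type} (f : β → γ) (g : α → β) (l : List (List α)) :
    mapG f (mapG g l) = mapG (fun x => f (g x)) l := by
  simp [mapG, List.map_map, Function.comp_def]

lemma validG_mem {R C : Nat} {c : List (List (Nat × Nat))} (hv : ValidG R C c) :
    ∀ row ∈ c, ∀ p ∈ row, InB R C p := by
  intro row hrow p hp
  obtain ⟨i, hi, hri⟩ := List.getElem_of_mem hrow
  obtain ⟨j, hj, hpj⟩ := List.getElem_of_mem hp
  have hiR : i < R := hv.1.1 ▸ hi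
  have hrowD : c.getD i [] = row := by rw [List.getD_eq_getElem _ _ hi, hri]
  have hjC : j < C := by rw [← hv.1.2 i hiR, hrowD]; exact hj
  have hval := hv.2 i j hiR hjC
  unfold cGet at hval
  dsimp only at hval
  rwa [hrowD, List.getD_eq_getElem _ _ hj, hpj] at hval

lemma mapG_congr_valid {R C : Nat} {α : Type} (F G : Nat × Nat → α)
    (c : List (List (Nat × Nat))) (hv : ValidG R C c)
    (h : ∀ p : Nat × Nat, InB R C p → F p = G p) : mapG F c = mapG G c := by
  unfold mapG
  refine List.map_congr_left ?_
  intro row hrow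
  refine List.map_congr_left ?_
  intro p hp
  exact h p (validG_mem hv row hrow p hp)

-- comp a b = mapG (lookup in a) b, definitionally
lemma comp_eq_mapG (a b : List (List (Nat × Nat))) :
    comp a b = mapG (fun p => cGet (0, 0) a p) b := rfl

lemma comp_validG {R C : Nat} {a b : List (List (Nat × Nat))}
    (ha : ValidG R C a) (hb : ValidG R C b) : ValidG R C (comp a b) := by
  rw [comp_eq_mapG]
  refine ⟨⟨by simp [mapG, hb.1.1], fun x hx => ?_⟩, fun x y hx hy => ?_⟩
  · rw [getD_mapG, List.length_map]
    exact hb.1.2 x hx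
  · rw [cGet_mapG (0,0) (0,0) _ b (x, y) (by rw [hb.1.2 x hx]; exact hy)]
    have hin := hb.2 x y hx hy
    exact ha.2 _ _ hin.1 hin.2

lemma comp_assoc {R C : Nat} (x b c : List (List (Nat × Nat)))
    (hb : Shaped R C b) (hc : ValidG R C c) :
    comp x (comp b c) = comp (comp x b) c := by
  rw [comp_eq_mapG, comp_eq_mapG, comp_eq_mapG, comp_eq_mapG, mapG_mapG]
  refine mapG_congr_valid _ _ c hc ?_
  intro p hp
  rw [cGet_mapG (0,0) (0,0) _ b p (by rw [hb.2 p.1 hp.1]; exact hp.2)]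

lemma double_comp {R C : Nat} (b : List (List (Nat × Nat))) (hb : ValidG R C b)
    (k : Nat) (x : List (List (Nat × Nat))) :
    (fun y => comp y (comp b b))^[k] x = (fun y => comp y b)^[2 * k] x := by
  induction k generalizing x with
  | zero => rfl
  | succ k ih =>
      rw [Function.iterate_succ_apply, ih,
        comp_assoc x b b hb.1 hb,
        show 2 * (k + 1) = (2 * k) + 1 + 1 by ring,
        Function.iterate_succ_apply, Function.iterate_succ_apply]

lemma powLoop_eq {R C : Nat} (e : Nat) (acc base : List (List (Nat × Nat)))
    (hbase : ValidG R C base) :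
    powLoop acc base e = (fun y => comp y base)^[e] acc := by
  induction e using Nat.strong_induction_on generalizing acc base with
  | _ e ih =>
    by_cases h : e = 0
    · subst h
      rw [powLoop]
      simp
    · rw [powLoop, dif_neg h]
      rw [ih (e / 2) (Nat.div_lt_self (Nat.pos_of_ne_zero h) (by omega)) _ _
        (comp_validG hbase hbase)]
      rw [double_comp _ hbase]
      by_cases hodd : e % 2 = 1
      · rw [if_pos hodd]
        have he : (fun y => comp y base)^[e] acc
            = (fun y => comp y base)^[2 * (e / 2)] (comp acc base) := by
          conv_lhs => rw [show e = 2 * (e / 2) + 1 from by omega]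
          rw [Function.iterate_succ_apply]
        rw [he]
      · rw [if_neg hodd]
        congr 1
        omega

-- rectangular input grids are Shaped
lemma pre_shaped (grid : List (List String))
    (hrect : ∀ row ∈ grid, row.length = (grid.getD 0 []).length) :
    Shaped grid.length (grid.getD 0 []).length grid := by
  refine ⟨rfl, fun a ha => ?_⟩
  rw [List.getD_eq_getElem _ _ ha]
  exact hrect _ (List.getElem_mem ha)

-- on a rectangular grid the per-row coordinate grid is the R×C coordinate grid
lemma labGrid_rect {R C : Nat} (g : List (List String)) (hs : Shaped R C g) :
    labGrid g = posGrid R C := by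
  unfold labGrid posGrid
  rw [hs.1]
  refine List.map_congr_left ?_
  intro i hi
  rw [hs.2 i (List.mem_range.mp hi)]

lemma labGrid_row (g : List (List String)) (i : Nat) (hi : i < g.length) :
    (labGrid g).getD i [] = (List.range ((g.getD i []).length)).map (fun j => (i, j)) := by
  rw [List.getD_eq_getElem _ _ (by simpa [labGrid] using hi)]
  simp [labGrid]

lemma labGrid_get (g : List (List String)) (i j : Nat) (hi : i < g.length)
    (hj : j < (g.getD i []).length) : cGet (0, 0) (labGrid g) (i, j) = (i, j) := by
  unfold cGet
  dsimp only
  rw [labGrid_row g i hi, List.getD_eq_getElem _ _ (by simpa using hj)]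
  simp

lemma mapG_labGrid {α : Type} (d : α) (g : List (List α)) (g' : List (List String))
    (hlen : g'.length = g.length)
    (hrows : ∀ i, i < g.length → (g'.getD i []).length = (g.getD i []).length) :
    mapG (fun p => cGet d g p) (labGrid g') = g := by
  apply List.ext_getElem
  · simp [mapG, labGrid, hlen]
  · intro i h1 h2
    have hrl : (g'.getD i []).length = (g.getD i []).length := hrows i h2
    apply List.ext_getElem
    · simp only [mapG, labGrid, List.getElem_map, List.getElem_range, List.length_map,
        List.length_range]
      rw [hrl, List.getD_eq_getElem g [] h2]
    · intro j hj1 hj2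
      simp only [mapG, labGrid, List.getElem_map, List.getElem_range]
      unfold cGet
      dsimp only
      rw [List.getD_eq_getElem g [] h2]
      exact List.getD_eq_getElem _ _ hj2

lemma comp_labGrid_self (g : List (List String)) :
    comp (labGrid g) (labGrid g) = labGrid g := by
  have hrows : ∀ row ∈ labGrid g,
      List.map (fun p => cGet (0, 0) (labGrid g) p) row = row := by
    intro row hrow
    obtain ⟨i, hi, hri⟩ := List.getElem_of_mem hrow
    have hig : i < g.length := by simpa [labGrid] using hi
    have hrowi : row = (List.range ((g.getD i []).length)).map (fun k => (i, k)) := by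
      rw [← hri]
      simp [labGrid]
    rw [hrowi, List.map_map]
    refine List.map_congr_left ?_
    intro k hk
    exact labGrid_get g i k hig (List.mem_range.mp hk)
  unfold comp
  conv_rhs => rw [← List.map_id (labGrid g)]
  refine List.map_congr_left ?_
  intro row hrow
  exact hrows row hrow

-- degenerate grids (no interior cells): a round changes nothing
lemma roundA_deg (key : String) (g : List (List String))
    (h : g.length ≤ 2 ∨ (g.getD 0 []).length ≤ 2) : roundA key g = g := by
  unfold roundA
  rcases h with h | h
  · rw [PySem.List.pyRange_one_eq_nil (show ((g.length : Int)) - 1 ≤ 1 by omega)]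
    rfl
  · have : (PySem.List.pyRange 1 ((g.length : Int) - 1) 1).foldl
        (fun st i =>
          (PySem.List.pyRange 1 (((st.1.getD 0 []).length : Int) - 1) 1).foldl
            (fun st' j => stepA key st' i.toNat j.toNat) st)
        (g, 0) = (g, 0) := by
      refine foldl_inv (fun st => st = (g, 0)) _ _ _ rfl ?_
      intro st i _ hP
      rw [hP]
      try dsimp only
      rw [PySem.List.pyRange_one_eq_nil
        (show (((g.getD 0 []).length : Int)) - 1 ≤ 1 by omega)]
      rfl
    rw [this]

lemma oneRound_deg (key : String) (R C : Nat) (l : List (List (Nat × Nat)))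
    (h : R ≤ 2 ∨ C ≤ 2) : oneRound key R C l = l := by
  unfold oneRound
  rcases h with h | h
  · rw [PySem.List.pyRange_one_eq_nil (show ((R : Int)) - 1 ≤ 1 by omega)]
    rfl
  · have : (PySem.List.pyRange 1 ((R : Int) - 1) 1).foldl
        (fun st i =>
          (PySem.List.pyRange 1 ((C : Int) - 1) 1).foldl
            (fun st' j => stepB key st' i.toNat j.toNat) st)
        (l, 0) = (l, 0) := by
      refine foldl_inv (fun st => st = (l, 0)) _ _ _ rfl ?_
      intro st i _ hP
      rw [hP]
      try dsimp only
      rw [PySem.List.pyRange_one_eq_nil (show ((C : Int)) - 1 ≤ 1 by omega)]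
      rfl
    rw [this]

lemma powLoop_const (b : List (List (Nat × Nat))) (hb : comp b b = b) (e : Nat) :
    powLoop b b e = b := by
  induction e using Nat.strong_induction_on with
  | _ e ih =>
    by_cases h : e = 0
    · subst h
      rw [powLoop]
      simp
    · rw [powLoop, dif_neg h, hb, ite_self]
      exact ih (e / 2) (Nat.div_lt_self (Nat.pos_of_ne_zero h) (by omega))

theorem calc_py_spec : Claim_equal_calc_py := by
  unfold Claim_equal_calc_py
  intro key grid _ hpre
  unfold Spec_calc_py
  by_cases hdeg : grid.length ≤ 2 ∨ (grid.getD 0 []).length ≤ 2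
  · -- degenerate: no rotation point exists, both sides return the grid unchanged
    have hA : calc_py key grid = grid := by
      unfold calc_py
      refine foldl_inv (fun g' => g' = grid) _ _ _ rfl ?_
      intro g' x _ hg'
      try dsimp only
      rw [hg']
      exact roundA_deg key grid hdeg
    rw [hA]
    show grid = calc_py_alt key grid
    simp only [calc_py_alt]
    rw [oneRound_deg key _ _ _ hdeg]
    rw [powLoop_const _ (comp_labGrid_self grid) 100]
    exact (mapG_labGrid "" grid grid rfl (fun _ _ => rfl)).symm
  · obtain ⟨-, hrect⟩ := hpre.resolve_left hdeg
    have hgs : Shaped grid.length (grid.getD 0 []).length grid := pre_shaped grid hrect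
    set R := grid.length with hR
    set C := (grid.getD 0 []).length with hC
    set σ := oneRound key R C (posGrid R C) with hσ
    have hσv : ValidG R C σ := oneRound_validG key _ (posGrid_validG R C)
    have main : ∀ t : Nat,
        (List.range t).foldl (fun g _ => roundA key g) grid
          = mapG (fun p => cGet "" grid p) ((fun y => comp y σ)^[t] (posGrid R C))
        ∧ ValidG R C ((fun y => comp y σ)^[t] (posGrid R C)) := by
      intro t
      induction t with
      | zero =>
          refine ⟨?_, posGrid_validG R C⟩
          simp only [List.range_zero, List.foldl_nil, Function.iterate_zero, id_eq]
          exact (mapG_posGrid "" grid hgs).symm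
      | succ t ih =>
          obtain ⟨ihEq, ihVal⟩ := ih
          refine ⟨?_, ?_⟩
          · rw [List.range_succ, List.foldl_append, List.foldl_cons, List.foldl_nil, ihEq]
            rw [round_sim key grid _ ihVal]
            congr 1
            rw [Function.iterate_succ_apply']
            calc oneRound key R C ((fun y => comp y σ)^[t] (posGrid R C))
                = oneRound key R C
                    (mapG (fun p => cGet (0,0) ((fun y => comp y σ)^[t] (posGrid R C)) p)
                      (posGrid R C)) := by
                  rw [mapG_posGrid (0,0) _ ihVal.1]
              _ = mapG (fun p => cGet (0,0) ((fun y => comp y σ)^[t] (posGrid R C)) p)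
                    (oneRound key R C (posGrid R C)) :=
                  round_nat key _ _ (posGrid_validG R C)
              _ = comp ((fun y => comp y σ)^[t] (posGrid R C)) σ :=
                  (comp_eq_mapG _ σ).symm
          · rw [Function.iterate_succ_apply']
            exact comp_validG ihVal hσv
    have hA : calc_py key grid
        = mapG (fun p => cGet "" grid p) ((fun y => comp y σ)^[100] (posGrid R C)) :=
      (main 100).1
    rw [hA]
    show _ = calc_py_alt key grid
    simp only [calc_py_alt]
    rw [labGrid_rect grid hgs]
    rw [← hR, ← hC, ← hσ]
    rw [powLoop_eq 100 (posGrid R C) σ hσv]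
    rfl
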